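-- pv_equiv track=rewrite | github.com/paiml/depyler | examples/hard_number_partition.py | count_partitions_two
-- ===== SOURCE A (Python) =====
-- def count_partitions_two(n: int) -> int:
--     """Count ways to partition n into exactly two positive parts."""
--     count: int = 0
--     a: int = 1
--     while a <= n // 2:
--         b: int = n - a
--         if b >= a:
--             count = count + 1
--         a = a + 1
--     return count
-- ===== SOURCE B (Python) =====
-- def count_partitions_two(n: int) -> int:
--     """Count ways to partition n into exactly two positive parts."""
--     return max(0, n // 2)
-- ===== Notes on version B (the rewrite author's own statement) =====
-- stated objective: faster
-- what changed: Replaced the O(n) counting loop with the closed form max(0, n // 2).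
import Mathlib
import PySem

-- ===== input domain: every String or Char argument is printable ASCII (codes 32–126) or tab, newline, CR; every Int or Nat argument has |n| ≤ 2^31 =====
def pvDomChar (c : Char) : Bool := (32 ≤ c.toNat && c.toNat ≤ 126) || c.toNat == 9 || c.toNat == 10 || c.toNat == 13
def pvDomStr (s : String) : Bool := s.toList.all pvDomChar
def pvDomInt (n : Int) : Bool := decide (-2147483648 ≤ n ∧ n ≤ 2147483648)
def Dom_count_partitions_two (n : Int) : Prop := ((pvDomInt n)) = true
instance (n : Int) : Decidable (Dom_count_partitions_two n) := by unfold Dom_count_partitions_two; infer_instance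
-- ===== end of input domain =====

-- B replaces A's O(n) counting loop with the closed form max(0, n // 2) (asymptotically faster).

-- ===== PORT A =====
-- while a <= n // 2: …  ported as recursion on the remaining iteration count (n//2 - a + 1)
def countLoop (n a count : Int) : Int :=
  if _h : a ≤ PySem.Int.floordiv n 2 then
    let b := n - a
    countLoop n (a + 1) (if b ≥ a then count + 1 else count)
  else count
termination_by (PySem.Int.floordiv n 2 + 1 - a).toNat
decreasing_by omega

def count_partitions_two (n : Int) : Int := countLoop n 1 0

-- ===== PORT B =====
def count_partitions_two_alt (n : Int) : Int := max 0 (PySem.Int.floordiv n 2)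

-- ===== PRECONDITION & SPEC =====
def Spec_count_partitions_two (n : Int) (out : Int) : Prop := out = count_partitions_two_alt n
instance (n : Int) (out : Int) : Decidable (Spec_count_partitions_two n out) := by unfold Spec_count_partitions_two; infer_instance

-- ===== CLAIM (what is proved, stated in full; the proofs are below) =====
def Claim_equal_count_partitions_two : Prop := ∀ (n : Int), Dom_count_partitions_two n → Spec_count_partitions_two n (count_partitions_two n)

-- ===== LEMMAS AND PROOFS =====
-- loop invariant: countLoop n a c = c + max 0 (n//2 - a + 1)
theorem countLoop_eq (n a count : Int) :
    countLoop n a count = count + max 0 (PySem.Int.floordiv n 2 + 1 - a) := by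
  rw [countLoop]
  split_ifs with h
  · have hb : n - a ≥ a := by
      have h2 : 2 * PySem.Int.floordiv n 2 ≤ n := by
        rw [PySem.Int.floordiv_eq_ediv_of_pos (by norm_num)]
        omega
      omega
    rw [countLoop_eq n (a + 1)]
    simp only [hb, if_true]
    omega
  · omega
termination_by (PySem.Int.floordiv n 2 + 1 - a).toNat
decreasing_by omega

-- ===== VERDICT (by name: the statement is the Claim_ definition above) =====
theorem count_partitions_two_spec : Claim_equal_count_partitions_two := by
  intro n _
  unfold Spec_count_partitions_two count_partitions_two count_partitions_two_alt
  rw [countLoop_eq]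
  omega
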